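-- pv_equiv track=rewrite | github.com/frizynn/linkedin-cli | linkedin_cli/client.py | normalize_activity_urn
-- ===== SOURCE A (Python) =====
-- class LinkedInClientError(RuntimeError):
--     """Raised when a LinkedIn operation fails."""
--
-- def normalize_activity_urn(identifier: str) -> str:
--     text = identifier.strip()
--     if not text:
--         raise LinkedInClientError("Activity identifier cannot be empty.")
--     if text.startswith("urn:li:activity:"):
--         return text
--     if text.isdigit():
--         return f"urn:li:activity:{text}"
--     if "linkedin.com" in text:
--         for part in text.rstrip("/").split("/"):
--             if part.startswith("urn:li:activity:"):
--                 return part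
--         for part in reversed([segment for segment in text.rstrip("/").split("/") if segment]):
--             if part.isdigit():
--                 return f"urn:li:activity:{part}"
--     raise LinkedInClientError(f"Unsupported LinkedIn activity identifier: {identifier}")
-- ===== SOURCE B (Python) =====
-- class LinkedInClientError(RuntimeError):
--     """Raised when a LinkedIn operation fails."""
--
-- def normalize_activity_urn(identifier: str) -> str:
--     text = identifier.strip()
--     if not text:
--         raise LinkedInClientError("Activity identifier cannot be empty.")
--     if text.startswith("urn:li:activity:"):
--         return text
--     if text.isdigit():
--         return f"urn:li:activity:{text}"
--     if "linkedin.com" in text: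
--         last_digit = None
--         for part in text.rstrip("/").split("/"):
--             if part.startswith("urn:li:activity:"):
--                 return part
--             if part.isdigit():
--                 last_digit = part
--         if last_digit is not None:
--             return f"urn:li:activity:{last_digit}"
--     raise LinkedInClientError(f"Unsupported LinkedIn activity identifier: {identifier}")
-- ===== Notes on version B (the rewrite author's own statement) =====
-- stated objective: simpler
-- what changed: The URL branch's two sequential scans (first-urn scan, then a reversed filtered digit scan) are merged into one forward pass that returns a urn segment immediately and tracks the last digit segment in a variable.
import Mathlib
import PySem

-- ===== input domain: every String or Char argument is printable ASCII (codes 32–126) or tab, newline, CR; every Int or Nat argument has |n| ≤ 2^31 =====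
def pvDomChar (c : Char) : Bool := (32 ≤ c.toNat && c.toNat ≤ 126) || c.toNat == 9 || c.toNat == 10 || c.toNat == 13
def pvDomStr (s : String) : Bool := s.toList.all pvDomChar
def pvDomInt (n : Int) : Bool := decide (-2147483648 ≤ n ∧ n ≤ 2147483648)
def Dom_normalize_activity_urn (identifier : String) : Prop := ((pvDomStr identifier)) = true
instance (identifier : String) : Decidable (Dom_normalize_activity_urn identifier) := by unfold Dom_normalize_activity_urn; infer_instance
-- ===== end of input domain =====

-- B merges A's two sequential scans over the URL segments (first-urn scan, then a reversed
-- filtered digit scan) into ONE forward pass tracking the last digit segment (objective: simpler).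
-- Where the Python raises LinkedInClientError, both ports return "" (excluded by Pre_).

-- shared constant: the urn prefix "urn:li:activity:"
def pvUrnPrefix : List Char := "urn:li:activity:".toList

-- exact hand port of text.rstrip("/"): drop trailing '/' characters
def pvRstripSlash (cs : List Char) : List Char := (cs.reverse.dropWhile (· = '/')).reverse

-- ===== PORT A =====
-- first loop: 'for part in …: if part.startswith("urn:li:activity:"): return part'
def pvLoopA1 : List (List Char) → Option (List Char)
  | [] => none
  | p :: rest => if PySem.Chars.startswith p pvUrnPrefix then some p else pvLoopA1 rest

-- second loop: 'for part in reversed([… if segment]): if part.isdigit(): return …'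
def pvLoopA2 : List (List Char) → Option (List Char)
  | [] => none
  | p :: rest => if PySem.Chars.strIsdigit p then some p else pvLoopA2 rest

def normalize_activity_urn (identifier : String) : String :=
  let text := (PySem.Str.strip identifier).toList
  if text = [] then ""  -- Python: raise LinkedInClientError (excluded by Pre_)
  else if PySem.Chars.startswith text pvUrnPrefix then String.ofList text
  else if PySem.Chars.strIsdigit text then String.ofList (pvUrnPrefix ++ text)
  else if PySem.Chars.isIn "linkedin.com".toList text then
    let segs := PySem.Chars.splitOn (pvRstripSlash text) ['/']
    match pvLoopA1 segs with
    | some p => String.ofList p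
    | none =>
      match pvLoopA2 ((segs.filter (· ≠ [])).reverse) with
      | some p => String.ofList (pvUrnPrefix ++ p)
      | none => ""  -- Python: raise LinkedInClientError (excluded by Pre_)
  else ""  -- Python: raise LinkedInClientError (excluded by Pre_)

-- ===== PORT B =====
-- B's single forward pass: return a urn segment immediately, remember the last digit segment
def pvLoopB : List (List Char) → Option (List Char) → String
  | [], none => ""  -- Python: raise LinkedInClientError (excluded by Pre_)
  | [], some d => String.ofList (pvUrnPrefix ++ d)
  | p :: rest, acc =>
    if PySem.Chars.startswith p pvUrnPrefix then String.ofList p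
    else if PySem.Chars.strIsdigit p then pvLoopB rest (some p)
    else pvLoopB rest acc

def normalize_activity_urn_alt (identifier : String) : String :=
  let text := (PySem.Str.strip identifier).toList
  if text = [] then ""  -- Python: raise LinkedInClientError (excluded by Pre_)
  else if PySem.Chars.startswith text pvUrnPrefix then String.ofList text
  else if PySem.Chars.strIsdigit text then String.ofList (pvUrnPrefix ++ text)
  else if PySem.Chars.isIn "linkedin.com".toList text then
    pvLoopB (PySem.Chars.splitOn (pvRstripSlash text) ['/']) none
  else ""  -- Python: raise LinkedInClientError (excluded by Pre_)

-- ===== PRECONDITION & SPEC =====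
-- Pre_ excludes exactly the inputs on which the Python raises LinkedInClientError:
-- empty after strip, or no urn/digit form and no usable linkedin.com URL segment.
def Pre_normalize_activity_urn (identifier : String) : Prop :=
  let text := (PySem.Str.strip identifier).toList
  text ≠ [] ∧
  (PySem.Chars.startswith text pvUrnPrefix = true ∨
   PySem.Chars.strIsdigit text = true ∨
   (PySem.Chars.isIn "linkedin.com".toList text = true ∧
    ∃ p ∈ PySem.Chars.splitOn (pvRstripSlash text) ['/'],
      PySem.Chars.startswith p pvUrnPrefix = true ∨ PySem.Chars.strIsdigit p = true))
instance (identifier : String) : Decidable (Pre_normalize_activity_urn identifier) := by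
  unfold Pre_normalize_activity_urn; infer_instance

def pvWitness_normalize_activity_urn : String := "https://www.linkedin.com/feed/update/urn:li:activity:7181/"

def Spec_normalize_activity_urn (identifier : String) (out : String) : Prop := out = normalize_activity_urn_alt identifier
instance (identifier : String) (out : String) : Decidable (Spec_normalize_activity_urn identifier out) := by unfold Spec_normalize_activity_urn; infer_instance

-- ===== CLAIM (what is proved, stated in full; the proofs are below) =====
def Claim_equal_normalize_activity_urn : Prop := ∀ (identifier : String), Dom_normalize_activity_urn identifier → Pre_normalize_activity_urn identifier → Spec_normalize_activity_urn identifier (normalize_activity_urn identifier)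

-- ===== LEMMAS AND PROOFS =====

-- the second A-loop over a list with one segment appended at the end
theorem pvLoopA2_append_singleton (l : List (List Char)) (p : List Char) :
    pvLoopA2 (l ++ [p]) =
      match pvLoopA2 l with
      | some q => some q
      | none => if PySem.Chars.strIsdigit p then some p else none := by
  induction l with
  | nil => simp [pvLoopA2]
  | cons x xs ih =>
    simp only [List.cons_append, pvLoopA2]
    by_cases h : PySem.Chars.strIsdigit x
    · simp [h]
    · simp [h, ih]

-- a digit segment is nonempty
theorem pv_digit_ne_nil (p : List Char) (h : PySem.Chars.strIsdigit p = true) : p ≠ [] := by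
  intro hp; subst hp; simp [PySem.Chars.strIsdigit] at h

-- main invariant: B's single pass computes A's two-pass result, with acc as fallback last digit
theorem pvLoopB_eq (segs : List (List Char)) (acc : Option (List Char)) :
    pvLoopB segs acc =
      match pvLoopA1 segs with
      | some p => String.ofList p
      | none =>
        match pvLoopA2 ((segs.filter (· ≠ [])).reverse) with
        | some p => String.ofList (pvUrnPrefix ++ p)
        | none =>
          match acc with
          | some d => String.ofList (pvUrnPrefix ++ d)
          | none => "" := by
  induction segs generalizing acc with
  | nil => cases acc <;> simp [pvLoopB, pvLoopA1, pvLoopA2]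
  | cons p rest ih =>
    cases hurn : PySem.Chars.startswith p pvUrnPrefix with
    | true => simp [pvLoopB, pvLoopA1, hurn]
    | false =>
      cases hdig : PySem.Chars.strIsdigit p with
      | true =>
        have hne : p ≠ [] := pv_digit_ne_nil p hdig
        simp only [pvLoopB, pvLoopA1, hurn, hdig, Bool.false_eq_true, if_false, if_true]
        rw [ih (some p)]
        have hfl : ((p :: rest).filter (· ≠ [])).reverse
            = (rest.filter (· ≠ [])).reverse ++ [p] := by simp [hne]
        rw [hfl, pvLoopA2_append_singleton]
        cases pvLoopA1 rest <;>
          cases hA2 : pvLoopA2 ((rest.filter (· ≠ [])).reverse) <;> simp [hdig]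
      | false =>
        simp only [pvLoopB, pvLoopA1, hurn, hdig, Bool.false_eq_true, if_false]
        rw [ih acc]
        by_cases hp : p = []
        · simp [hp]
        · have hfl : ((p :: rest).filter (· ≠ [])).reverse
              = (rest.filter (· ≠ [])).reverse ++ [p] := by simp [hp]
          rw [hfl, pvLoopA2_append_singleton]
          cases pvLoopA1 rest <;>
            cases hA2 : pvLoopA2 ((rest.filter (· ≠ [])).reverse) <;> simp [hdig]

-- ===== VERDICT (by name: the statement is the Claim_ definition above) =====
theorem normalize_activity_urn_spec : Claim_equal_normalize_activity_urn := by
  intro identifier _ _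
  unfold Spec_normalize_activity_urn normalize_activity_urn normalize_activity_urn_alt
  simp only []
  rw [pvLoopB_eq]
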